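-- pv_equiv track=rewrite | github.com/nithinppn/Create-CV-Cover-Letter | main.py | enforce_bullet_limit
-- ===== SOURCE A (Python) =====
-- def enforce_bullet_limit(text, max_bullets):
--     """
--     Parses text line-by-line.
--     Resets bullet count when a non-bullet line (Header) is found.
--     """
--     lines = text.split('\n')
--     cleaned_lines = []
--     current_bullet_count = 0
--
--     for line in lines:
--         line = line.strip()
--         if not line:
--             continue  # Skip empty lines to prevent double spacing issues
--
--         # Check if line is a bullet point
--         if line.startswith('- ') or line.startswith('* '):
--             if current_bullet_count < max_bullets:
--                 cleaned_lines.append(line)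
--                 current_bullet_count += 1
--
--         # If not a bullet, it's a Header/Role line
--         else:
--             # Add a newline before a new header (unless it's the very first line)
--             if cleaned_lines:
--                 cleaned_lines.append("")
--
--             cleaned_lines.append(line)
--             current_bullet_count = 0  # Reset counter for the new role
--
--     return "\n".join(cleaned_lines)
-- ===== SOURCE B (Python) =====
-- def enforce_bullet_limit(text, max_bullets):
--     """Group lines into sections, then render each section with at most
--     max(0, max_bullets) bullets and join the non-empty sections with blank lines."""
--     groups = []
--     current = None  # (header_or_None, bullets)
--     for raw in text.split('\n'):
--         line = raw.strip()
--         if not line: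
--             continue
--         if line.startswith('- ') or line.startswith('* '):
--             if current is None:
--                 current = (None, [])
--             current[1].append(line)
--         else:
--             if current is not None:
--                 groups.append(current)
--             current = (line, [])
--     if current is not None:
--         groups.append(current)
--     limit = max(0, max_bullets)
--     blocks = []
--     for header, bullets in groups:
--         section = ([header] if header is not None else []) + bullets[:limit]
--         if section:
--             blocks.append('\n'.join(section))
--     return '\n\n'.join(blocks)
-- ===== Notes on version B (the rewrite author's own statement) =====
-- stated objective: alternative
-- what changed: Replaces A's single pass with a running bullet counter and a flat output list holding explicit "" separator lines by a two-pass decomposition: first group the stripped non-empty lines into sections (optional header + its bullets), then render each section with at most max(0, max_bullets) bullets and join the non-empty rendered sections with '\n\n'.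
import Mathlib
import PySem

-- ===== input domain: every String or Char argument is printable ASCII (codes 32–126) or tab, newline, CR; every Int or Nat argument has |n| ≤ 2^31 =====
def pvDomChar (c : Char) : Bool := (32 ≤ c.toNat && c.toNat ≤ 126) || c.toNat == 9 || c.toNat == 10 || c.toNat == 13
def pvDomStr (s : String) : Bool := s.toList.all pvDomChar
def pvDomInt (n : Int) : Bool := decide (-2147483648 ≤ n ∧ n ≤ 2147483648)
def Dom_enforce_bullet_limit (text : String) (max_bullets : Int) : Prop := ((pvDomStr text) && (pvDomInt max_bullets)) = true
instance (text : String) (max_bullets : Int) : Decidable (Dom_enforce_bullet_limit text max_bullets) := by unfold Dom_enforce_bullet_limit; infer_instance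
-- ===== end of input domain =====

-- B restructures A (running bullet counter + flat list with "" separators) into two passes:
-- group lines into sections, then render ≤ max(0, max_bullets) bullets per section and join
-- non-empty sections with blank lines; same return value, objective: alternative decomposition.

-- ===== PORT A =====
-- loop body of A's single pass: state = (cleaned_lines, current_bullet_count)
def pvStepA (mb : Int) (st : List String × Int) (raw : String) : List String × Int :=
  let line := PySem.Str.strip raw
  if line = "" then st
  else if PySem.Str.startswith line "- " || PySem.Str.startswith line "* " then
    if st.2 < mb then (st.1 ++ [line], st.2 + 1) else st
  else
    ((if st.1 = [] then st.1 else st.1 ++ [""]) ++ [line], 0)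

def enforce_bullet_limit (text : String) (max_bullets : Int) : String :=
  -- text.split('\n'): sep "\n" ≠ "" so split? is `some`; getD is exact here
  let lines := (PySem.Str.split? text "\n").getD []
  let st := lines.foldl (pvStepA max_bullets) ([], 0)
  PySem.Str.join "\n" st.1

-- ===== PORT B =====
-- B state: (finished groups, current group); a group = (optional header, its bullets)
def pvStepB (st : List (Option String × List String) × Option (Option String × List String))
    (raw : String) : List (Option String × List String) × Option (Option String × List String) :=
  let line := PySem.Str.strip raw
  if line = "" then st
  else if PySem.Str.startswith line "- " || PySem.Str.startswith line "* " then
    match st.2 with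
    | none => (st.1, some (none, [line]))
    | some (h, bs) => (st.1, some (h, bs ++ [line]))
  else
    match st.2 with
    | none => (st.1, some (some line, []))
    | some c => (st.1 ++ [c], some (some line, []))

-- ([header] if header is not None else []) + bullets[:limit]
def pvRender (limit : Int) (g : Option String × List String) : List String :=
  (match g.1 with | some h => [h] | none => []) ++ PySem.List.slice g.2 none (some limit)

def pvStepBlocks (limit : Int) (blocks : List String) (g : Option String × List String) : List String :=
  let sec := pvRender limit g
  if sec = [] then blocks else blocks ++ [PySem.Str.join "\n" sec]

def enforce_bullet_limit_alt (text : String) (max_bullets : Int) : String :=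
  let st := ((PySem.Str.split? text "\n").getD []).foldl pvStepB ([], none)
  let groups := st.1 ++ (match st.2 with | none => [] | some c => [c])
  let limit := max 0 max_bullets
  let blocks := groups.foldl (pvStepBlocks limit) []
  PySem.Str.join "\n\n" blocks

-- ===== PRECONDITION & SPEC =====
def Spec_enforce_bullet_limit (text : String) (max_bullets : Int) (out : String) : Prop := out = enforce_bullet_limit_alt text max_bullets
instance (text : String) (max_bullets : Int) (out : String) : Decidable (Spec_enforce_bullet_limit text max_bullets out) := by unfold Spec_enforce_bullet_limit; infer_instance

-- ===== CLAIM (what is proved, stated in full; the proofs are below) =====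
def Claim_equal_enforce_bullet_limit : Prop := ∀ (text : String) (max_bullets : Int), Dom_enforce_bullet_limit text max_bullets → Spec_enforce_bullet_limit text max_bullets (enforce_bullet_limit text max_bullets)

-- ===== LEMMAS AND PROOFS =====

-- flatten a list of blocks, separating consecutive blocks by the element e
def pvFlat {α : Type} (e : α) : List (List α) → List α
  | [] => []
  | [b] => b
  | b :: c :: rest => b ++ e :: pvFlat e (c :: rest)

-- the non-empty rendered sections
def pvBlocksOf (limit : Int) (gs : List (Option String × List String)) : List (List String) :=
  (gs.map (pvRender limit)).filter (· ≠ [])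

def pvOptList {α : Type} : Option α → List α
  | none => []
  | some c => [c]

-- invariant on B's loop state
def pvGoodB (st : List (Option String × List String) × Option (Option String × List String)) : Prop :=
  match st.2 with
  | none => st.1 = []
  | some (none, bs) => st.1 = [] ∧ bs ≠ []
  | some (some _, _) => True

-- abstraction: B's state viewed as A's state
def pvAbs (mb : Int) (st : List (Option String × List String) × Option (Option String × List String)) :
    List String × Int :=
  (pvFlat "" (pvBlocksOf (max 0 mb) (st.1 ++ pvOptList st.2)),
   match st.2 with
   | none => 0
   | some (_, bs) => min (bs.length : Int) (max 0 mb))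

theorem pvFlat_append {α : Type} (e : α) (X : List (List α)) (b : List α) :
    pvFlat e (X ++ [b]) = pvFlat e X ++ (if X = [] then [] else [e]) ++ b := by
  induction X with
  | nil => simp [pvFlat]
  | cons x X ih =>
    cases X with
    | nil => simp [pvFlat]
    | cons y Y =>
      rw [show (x :: y :: Y) ++ [b] = x :: ((y :: Y) ++ [b]) by simp]
      rw [show (y :: Y) ++ [b] = y :: (Y ++ [b]) by simp, pvFlat]
      rw [show y :: (Y ++ [b]) = (y :: Y) ++ [b] by simp, ih]
      simp [pvFlat]

theorem pvFlat_eq_nil {α : Type} (e : α) (B : List (List α)) (h : ∀ b ∈ B, b ≠ []) :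
    pvFlat e B = [] ↔ B = [] := by
  cases B with
  | nil => simp [pvFlat]
  | cons b rest =>
    cases rest with
    | nil =>
      simp only [pvFlat]
      have := h b (by simp)
      simp [this]
    | cons c r =>
      simp only [pvFlat]
      have := h b (by simp)
      constructor
      · intro hh; exact absurd (List.append_eq_nil_iff.mp hh).1 this
      · intro hh; cases hh

theorem pvBlocksOf_append (limit : Int) (gs : List (Option String × List String))
    (g : Option String × List String) :
    pvBlocksOf limit (gs ++ [g]) =
      pvBlocksOf limit gs ++ (if pvRender limit g = [] then [] else [pvRender limit g]) := by
  simp only [pvBlocksOf, List.map_append, List.filter_append, List.map_cons, List.map_nil]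
  split_ifs with h <;> simp [List.filter, h]

theorem pvBlocks_nonempty (limit : Int) (gs : List (Option String × List String)) :
    ∀ b ∈ pvBlocksOf limit gs, b ≠ [] := by
  intro b hb
  have := List.of_mem_filter hb
  simpa using this

theorem pvAbs_some (mb : Int) (gs : List (Option String × List String)) (h : Option String)
    (bs : List String) :
    pvAbs mb (gs, some (h, bs)) =
      (pvFlat "" (pvBlocksOf (max 0 mb) (gs ++ [(h, bs)])), min (bs.length : Int) (max 0 mb)) := rfl

theorem pvAbs_none (mb : Int) (gs : List (Option String × List String)) :
    pvAbs mb (gs, none) = (pvFlat "" (pvBlocksOf (max 0 mb) gs), 0) := by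
  simp [pvAbs, pvOptList]

theorem pvFlat_last_append (X : List (List String)) (r : List String) (x : String) :
    pvFlat "" (X ++ [r ++ [x]]) = pvFlat "" (X ++ [r]) ++ [x] := by
  rw [pvFlat_append, pvFlat_append]
  simp

theorem pvRender_eq (mb : Int) (hdr : Option String) (bs : List String) :
    pvRender (max 0 mb) (hdr, bs) =
      (match hdr with | some h => [h] | none => []) ++ bs.take (max 0 mb).toNat := by
  unfold pvRender
  rw [PySem.List.slice_to _ (le_max_left 0 mb)]

-- one step of B simulates one step of A through the abstraction
theorem pvStep_sim (mb : Int) (st : List (Option String × List String) × Option (Option String × List String))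
    (raw : String) (hG : pvGoodB st) :
    pvGoodB (pvStepB st raw) ∧ pvAbs mb (pvStepB st raw) = pvStepA mb (pvAbs mb st) raw := by
  obtain ⟨gs, cur⟩ := st
  unfold pvStepB pvStepA
  dsimp only
  by_cases hline : PySem.Str.strip raw = ""
  · rw [if_pos hline, if_pos hline]
    exact ⟨hG, rfl⟩
  rw [if_neg hline, if_neg hline]
  by_cases hbul : (PySem.Str.startswith (PySem.Str.strip raw) "- "
      || PySem.Str.startswith (PySem.Str.strip raw) "* ") = true
  · rw [if_pos hbul, if_pos hbul]
    cases cur with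
    | none =>
      have hgs : gs = [] := hG
      subst hgs
      refine ⟨⟨rfl, by simp⟩, ?_⟩
      rw [pvAbs_none, pvAbs_some]
      by_cases hpos : (0 : Int) < mb
      · rw [if_pos (by simpa [pvBlocksOf, pvFlat] using hpos)]
        have htake : List.take (max 0 mb).toNat [PySem.Str.strip raw] = [PySem.Str.strip raw] :=
          List.take_of_length_le (by simp; omega)
        simp [pvBlocksOf, pvRender_eq, htake, pvFlat]
        omega
      · rw [if_neg (by simpa [pvBlocksOf, pvFlat] using hpos)]
        have hz : (max 0 mb).toNat = 0 := by omega
        simp [pvBlocksOf, pvRender_eq, hz, pvFlat]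
        omega
    | some c =>
      obtain ⟨h, bs⟩ := c
      have hGnew : pvGoodB (gs, some (h, bs ++ [PySem.Str.strip raw])) := by
        cases h with
        | none => exact ⟨hG.1, by simp⟩
        | some a => trivial
      refine ⟨hGnew, ?_⟩
      rw [pvAbs_some, pvAbs_some]
      have hiff : (min (bs.length : Int) (max 0 mb) < mb) ↔ ((bs.length : Int) < max 0 mb) := by omega
      by_cases hkeep : (bs.length : Int) < max 0 mb
      · rw [if_pos (hiff.mpr hkeep)]
        have hrne : pvRender (max 0 mb) (h, bs) ≠ [] := by
          rw [pvRender_eq]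
          cases h with
          | some a => simp
          | none =>
            have hbs : bs ≠ [] := hG.2
            have : bs.take (max 0 mb).toNat ≠ [] := by
              intro hnil
              rcases List.take_eq_nil_iff.mp hnil with h0 | h0
              · omega
              · exact hbs h0
            simpa using this
        have htake1 : List.take (max 0 mb).toNat bs = bs :=
          List.take_of_length_le (by omega)
        have htake2 : List.take (max 0 mb).toNat (bs ++ [PySem.Str.strip raw])
            = bs ++ [PySem.Str.strip raw] :=
          List.take_of_length_le (by simp; omega)
        have hr2 : pvRender (max 0 mb) (h, bs ++ [PySem.Str.strip raw])
            = pvRender (max 0 mb) (h, bs) ++ [PySem.Str.strip raw] := by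
          rw [pvRender_eq, pvRender_eq, htake1, htake2]
          simp
        rw [pvBlocksOf_append, pvBlocksOf_append, hr2]
        rw [if_neg (by simp [hrne]), if_neg hrne]
        rw [pvFlat_last_append]
        refine Prod.ext rfl ?_
        simp only
        have : ((bs ++ [PySem.Str.strip raw]).length : Int) = (bs.length : Int) + 1 := by simp
        rw [this]
        omega
      · rw [if_neg (fun hc => hkeep (hiff.mp hc))]
        have htake : List.take (max 0 mb).toNat (bs ++ [PySem.Str.strip raw])
            = List.take (max 0 mb).toNat bs :=
          List.take_append_of_le_length (by omega)
        have hr2 : pvRender (max 0 mb) (h, bs ++ [PySem.Str.strip raw])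
            = pvRender (max 0 mb) (h, bs) := by
          rw [pvRender_eq, pvRender_eq, htake]
        rw [pvBlocksOf_append, pvBlocksOf_append, hr2]
        refine Prod.ext rfl ?_
        simp only
        have : ((bs ++ [PySem.Str.strip raw]).length : Int) = (bs.length : Int) + 1 := by simp
        rw [this]
        omega
  · rw [if_neg hbul, if_neg hbul]
    have hrline : pvRender (max 0 mb) (some (PySem.Str.strip raw), []) = [PySem.Str.strip raw] := by
      rw [pvRender_eq]
      simp
    cases cur with
    | none =>
      have hgs : gs = [] := hG
      subst hgs
      refine ⟨trivial, ?_⟩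
      rw [pvAbs_none, pvAbs_some]
      have hB : pvBlocksOf (max 0 mb) ([] : List (Option String × List String)) = [] := rfl
      rw [hB]
      rw [show ([] : List (Option String × List String)) ++ [(some (PySem.Str.strip raw), [])]
          = [(some (PySem.Str.strip raw), [])] by simp]
      simp only [pvBlocksOf, List.map_cons, List.map_nil, hrline]
      simp [pvFlat]
    | some c =>
      refine ⟨trivial, ?_⟩
      obtain ⟨h, bs⟩ := c
      rw [pvAbs_some, pvAbs_some]
      rw [show gs ++ [(h, bs)] ++ [(some (PySem.Str.strip raw), [])]
          = (gs ++ [(h, bs)]) ++ [(some (PySem.Str.strip raw), [])] by simp]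
      rw [pvBlocksOf_append, hrline, if_neg (by simp)]
      rw [pvFlat_append]
      refine Prod.ext ?_ (by simp)
      simp only
      by_cases hBnil : pvBlocksOf (max 0 mb) (gs ++ [(h, bs)]) = []
      · rw [if_pos ((pvFlat_eq_nil "" _ (pvBlocks_nonempty _ _)).mpr hBnil)]
        simp [hBnil, pvFlat]
      · rw [if_neg (fun hc => hBnil ((pvFlat_eq_nil "" _ (pvBlocks_nonempty _ _)).mp hc))]
        simp [hBnil]

theorem pvFold_sim (mb : Int) (raws : List String)
    (st : List (Option String × List String) × Option (Option String × List String))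
    (hG : pvGoodB st) :
    pvGoodB (raws.foldl pvStepB st) ∧
      pvAbs mb (raws.foldl pvStepB st) = raws.foldl (pvStepA mb) (pvAbs mb st) := by
  induction raws generalizing st with
  | nil => exact ⟨hG, rfl⟩
  | cons r rs ih =>
    obtain ⟨h1, h2⟩ := pvStep_sim mb st r hG
    obtain ⟨h3, h4⟩ := ih (pvStepB st r) h1
    exact ⟨h3, by simp only [List.foldl_cons, h4, h2]⟩

theorem pvBlocksFold (limit : Int) (gs : List (Option String × List String)) (acc : List String) :
    gs.foldl (pvStepBlocks limit) acc = acc ++ (pvBlocksOf limit gs).map (PySem.Str.join "\n") := by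
  induction gs generalizing acc with
  | nil => simp [pvBlocksOf]
  | cons g gs ih =>
    by_cases h : pvRender limit g = [] <;>
      simp [List.foldl_cons, ih, pvStepBlocks, pvBlocksOf, h]

theorem pvFlat_map {α β : Type} (f : α → β) (e : α) (B : List (List α)) :
    (pvFlat e B).map f = pvFlat (f e) (B.map (List.map f)) := by
  induction B with
  | nil => simp [pvFlat]
  | cons b rest ih =>
    cases rest with
    | nil => simp [pvFlat]
    | cons c r => simp only [pvFlat, List.map_append, List.map_cons, ih]

theorem pvFlat_ne_nil {α : Type} (e : α) (c : List α) (rest : List (List α)) (hc : c ≠ []) :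
    pvFlat e (c :: rest) ≠ [] := by
  cases rest with
  | nil => simpa [pvFlat] using hc
  | cons r rs => simp [pvFlat]

theorem pvJoinSep (b L : List (List Char)) (hb : b ≠ []) (hL : L ≠ []) :
    PySem.Chars.join ['\n'] (b ++ ([] : List Char) :: L) =
      PySem.Chars.join ['\n'] b ++ '\n' :: '\n' :: PySem.Chars.join ['\n'] L := by
  induction b with
  | nil => exact absurd rfl hb
  | cons x b ih =>
    cases b with
    | nil =>
      cases L with
      | nil => exact absurd rfl hL
      | cons l L' =>
        rw [show ([x] ++ ([] : List Char) :: l :: L') = x :: ([] : List Char) :: l :: L' by simp]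
        rw [PySem.Chars.join_cons_cons, PySem.Chars.join_cons_cons, PySem.Chars.join_singleton]
        simp
    | cons y b' =>
      rw [show ((x :: y :: b') ++ ([] : List Char) :: L) = x :: ((y :: b') ++ ([] : List Char) :: L) by simp]
      rw [show ((y :: b') ++ ([] : List Char) :: L) = y :: (b' ++ ([] : List Char) :: L) by simp]
      rw [PySem.Chars.join_cons_cons]
      rw [show y :: (b' ++ ([] : List Char) :: L) = (y :: b') ++ ([] : List Char) :: L by simp]
      rw [ih (by simp)]
      rw [PySem.Chars.join_cons_cons]
      simp

theorem pvJoinChars (B : List (List (List Char))) (hB : ∀ b ∈ B, b ≠ []) :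
    PySem.Chars.join ['\n'] (pvFlat [] B) =
      PySem.Chars.join ['\n', '\n'] (B.map (PySem.Chars.join ['\n'])) := by
  induction B with
  | nil => simp [pvFlat, PySem.Chars.join_nil]
  | cons b rest ih =>
    cases rest with
    | nil => simp [pvFlat, PySem.Chars.join_singleton]
    | cons c r =>
      have hb : b ≠ [] := hB b (by simp)
      have hc : c ≠ [] := hB c (by simp)
      have hrest : ∀ x ∈ c :: r, x ≠ [] := fun x hx => hB x (by simp [hx])
      rw [show pvFlat ([] : List Char) (b :: c :: r) = b ++ ([] : List Char) :: pvFlat [] (c :: r) from rfl]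
      rw [pvJoinSep b _ hb (pvFlat_ne_nil _ _ _ hc), ih hrest]
      simp only [List.map_cons]
      rw [PySem.Chars.join_cons_cons]
      simp

theorem pvJoin (B : List (List String)) (hB : ∀ b ∈ B, b ≠ []) :
    PySem.Str.join "\n" (pvFlat "" B) =
      PySem.Str.join "\n\n" (B.map (PySem.Str.join "\n")) := by
  unfold PySem.Str.join
  congr 1
  rw [pvFlat_map]
  rw [show ("" : String).toList = ([] : List Char) from rfl]
  rw [show ("\n" : String).toList = ['\n'] from rfl]
  rw [show ("\n\n" : String).toList = ['\n', '\n'] from rfl]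
  rw [pvJoinChars _ (by
    intro b hb
    obtain ⟨b', hb', rfl⟩ := List.mem_map.mp hb
    simpa using hB b' hb')]
  congr 1
  simp only [List.map_map]
  apply List.map_congr_left
  intro b _
  simp [Function.comp, String.toList_ofList]

-- ===== VERDICT (by name: the statement is the Claim_ definition above) =====
theorem enforce_bullet_limit_spec : Claim_equal_enforce_bullet_limit := by
  intro text mb _
  unfold Spec_enforce_bullet_limit enforce_bullet_limit enforce_bullet_limit_alt
  dsimp only
  obtain ⟨_, habs⟩ := pvFold_sim mb ((PySem.Str.split? text "\n").getD []) ([], none) (by simp [pvGoodB])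
  have h0 : pvAbs mb ([], none) = (([] : List String), (0 : Int)) := by
    simp [pvAbs, pvBlocksOf, pvOptList, pvFlat]
  rw [h0] at habs
  set stB := ((PySem.Str.split? text "\n").getD []).foldl pvStepB ([], none) with hstB
  rw [pvBlocksFold]
  have hgroups : stB.1 ++ (match stB.2 with | none => [] | some c => [c]) = stB.1 ++ pvOptList stB.2 := by
    cases stB.2 <;> rfl
  rw [hgroups]
  have hclean : (((PySem.Str.split? text "\n").getD []).foldl (pvStepA mb) ([], 0)).1
      = pvFlat "" (pvBlocksOf (max 0 mb) (stB.1 ++ pvOptList stB.2)) := by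
    rw [← habs]; rfl
  rw [hclean, List.nil_append]
  exact pvJoin _ (pvBlocks_nonempty _ _)
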